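-- pv_equiv track=rewrite | github.com/MaurizioMartin/codewars | Katas/40-morse.py | checkLetter
-- ===== SOURCE A (Python) =====
-- def checkLetter(word):
--     MORSE_CODE_DICT = { 'A':'.-', 'B':'-...',
--        'C':'-.-.', 'D':'-..', 'E':'.',
--        'F':'..-.', 'G':'--.', 'H':'....',
--        'I':'..', 'J':'.---', 'K':'-.-',
--        'L':'.-..', 'M':'--', 'N':'-.',
--        'O':'---', 'P':'.--.', 'Q':'--.-',
--        'R':'.-.', 'S':'...', 'T':'-',
--        'U':'..-', 'V':'...-', 'W':'.--',
--        'X':'-..-', 'Y':'-.--', 'Z':'--..',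
--        '1':'.----', '2':'..---', '3':'...--',
--        '4':'....-', '5':'.....', '6':'-....',
--        '7':'--...', '8':'---..', '9':'----.',
--        '0':'-----', ', ':'--..--', '.':'.-.-.-',
--        '?':'..--..', '/':'-..-.', '-':'-....-',
--        '(':'-.--.', ')':'-.--.-', '!':'-.-.--',
--        'SOS':'...---...'
--     }
--     word = [k for k, v in MORSE_CODE_DICT.items() if word == v]
--     if word:
--         return word[0]
-- ===== SOURCE B (Python) =====
-- # B: decode by walking a Morse binary trie (dot = left, dash = right) one symbol at a time;
-- # no scan over table entries, no dictionary lookup of the whole word.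
-- # Node = (value_or_None, dot_child, dash_child); child None = dead end.
-- MORSE_TRIE = (None, ('E', ('I', ('S', ('H', ('5', None, None), ('4', None, None)), ('V', None, ('3', None, (None, (None, (None, ('SOS', None, None), None), None), None)))), ('U', ('F', None, None), (None, (None, ('?', None, None), None), ('2', None, None)))), ('A', ('R', ('L', None, None), (None, (None, None, ('.', None, None)), None)), ('W', ('P', None, None), ('J', None, ('1', None, None))))), ('T', ('N', ('D', ('B', ('6', None, ('-', None, None)), None), ('X', ('/', None, None), None)), ('K', ('C', None, (None, None, ('!', None, None))), ('Y', ('(', None, (')', None, None)), None))), ('M', ('G', ('Z', ('7', None, None), (None, None, (', ', None, None))), ('Q', None, None)), ('O', (None, ('8', None, None), None), (None, ('9', None, None), ('0', None, None))))))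
--
--
-- def checkLetter(word):
--     node = MORSE_TRIE
--     for c in word:
--         if c == '.':
--             node = node[1]
--         elif c == '-':
--             node = node[2]
--         else:
--             return None
--         if node is None:
--             return None
--     return node[0]
-- ===== Notes on version B (the rewrite author's own statement) =====
-- stated objective: alternative
-- what changed: A rebuilds the forward dict and scans all 45 (letter, morse) pairs comparing the whole word each call; B walks a precomputed Morse binary trie (dot = left child, dash = right child) one symbol at a time, returning the value stored at the reached node (None on a dead end, foreign character, or valueless node) - all 45 codes are distinct, so the results coincide.
import Mathlib
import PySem

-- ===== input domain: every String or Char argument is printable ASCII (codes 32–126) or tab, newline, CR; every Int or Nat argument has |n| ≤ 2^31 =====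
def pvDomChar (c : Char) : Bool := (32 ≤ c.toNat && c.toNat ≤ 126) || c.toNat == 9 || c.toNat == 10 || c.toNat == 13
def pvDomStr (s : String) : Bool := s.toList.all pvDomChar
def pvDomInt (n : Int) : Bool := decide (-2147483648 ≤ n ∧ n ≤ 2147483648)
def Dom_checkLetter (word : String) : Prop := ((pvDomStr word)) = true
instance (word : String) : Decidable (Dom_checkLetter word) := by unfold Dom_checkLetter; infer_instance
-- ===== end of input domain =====

-- B decodes by walking a Morse binary trie (dot = left, dash = right) symbol by symbol,
-- instead of A's scan over all 45 (letter, morse) pairs; all codes are distinct, so they agree.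

-- ===== PORT A =====
-- the forward dict literal of A, as an insertion-ordered pair list
def pvMorseFwd : List (String × String) := [("A", ".-"), ("B", "-..."), ("C", "-.-."), ("D", "-.."), ("E", "."), ("F", "..-."), ("G", "--."), ("H", "...."), ("I", ".."), ("J", ".---"), ("K", "-.-"), ("L", ".-.."), ("M", "--"), ("N", "-."), ("O", "---"), ("P", ".--."), ("Q", "--.-"), ("R", ".-."), ("S", "..."), ("T", "-"), ("U", "..-"), ("V", "...-"), ("W", ".--"), ("X", "-..-"), ("Y", "-.--"), ("Z", "--.."), ("1", ".----"), ("2", "..---"), ("3", "...--"), ("4", "....-"), ("5", "....."), ("6", "-...."), ("7", "--..."), ("8", "---.."), ("9", "----."), ("0", "-----"), (", ", "--..--"), (".", ".-.-.-"), ("?", "..--.."), ("/", "-..-."), ("-", "-....-"), ("(", "-.--."), (")", "-.--.-"), ("!", "-.-.--"), ("SOS", "...---...")]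

-- A: word = [k for k, v in MORSE_CODE_DICT.items() if word == v]; if word: return word[0]
def checkLetter (word : String) : Option String :=
  let ks := (pvMorseFwd.filter (fun p => word == p.2)).map (fun p => p.1)
  ks.head?

-- ===== PORT B =====
-- B's trie node: optional decoded value, dot child, dash child (nil = absent child, Python None)
inductive MTrie where
  | nil : MTrie
  | node : Option String → MTrie → MTrie → MTrie
deriving DecidableEq, Repr

-- B's literal MORSE_TRIE
def pvMorseTrie : MTrie := (.node none (.node (some "E") (.node (some "I") (.node (some "S") (.node (some "H") (.node (some "5") .nil .nil) (.node (some "4") .nil .nil)) (.node (some "V") .nil (.node (some "3") .nil (.node none (.node none (.node none (.node (some "SOS") .nil .nil) .nil) .nil) .nil)))) (.node (some "U") (.node (some "F") .nil .nil) (.node none (.node none (.node (some "?") .nil .nil) .nil) (.node (some "2") .nil .nil)))) (.node (some "A") (.node (some "R") (.node (some "L") .nil .nil) (.node none (.node none .nil (.node (some ".") .nil .nil)) .nil)) (.node (some "W") (.node (some "P") .nil .nil) (.node (some "J") .nil (.node (some "1") .nil .nil))))) (.node (some "T") (.node (some "N") (.node (some "D") (.node (some "B") (.node (some "6") .nil (.node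 (some "-") .nil .nil)) .nil) (.node (some "X") (.node (some "/") .nil .nil) .nil)) (.node (some "K") (.node (some "C") .nil (.node none .nil (.node (some "!") .nil .nil))) (.node (some "Y") (.node (some "(") .nil (.node (some ")") .nil .nil)) .nil))) (.node (some "M") (.node (some "G") (.node (some "Z") (.node (some "7") .nil .nil) (.node none .nil (.node (some ", ") .nil .nil))) (.node (some "Q") .nil .nil)) (.node (some "O") (.node none (.node (some "8") .nil .nil) .nil) (.node none (.node (some "9") .nil .nil) (.node (some "0") .nil .nil))))))

-- B's loop: step into the child chosen by the current symbol, fail on a dead end or foreign char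
def pvWalk : MTrie → List Char → Option String
  | .nil, _ => none
  | .node v _ _, [] => v
  | .node _ l r, c :: cs =>
      if c = '.' then pvWalk l cs
      else if c = '-' then pvWalk r cs
      else none

def checkLetter_alt (word : String) : Option String :=
  pvWalk pvMorseTrie word.toList

-- ===== PRECONDITION & SPEC =====
def Spec_checkLetter (word : String) (out : Option String) : Prop := out = checkLetter_alt word
instance (word : String) (out : Option String) : Decidable (Spec_checkLetter word out) := by unfold Spec_checkLetter; infer_instance

-- ===== CLAIM =====
def Claim_equal_checkLetter : Prop := ∀ (word : String), Dom_checkLetter word → Spec_checkLetter word (checkLetter word)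

-- ===== LEMMAS AND PROOFS =====

-- first-match lookup in an association list keyed by char lists
def pvLookC : List (List Char × String) → List Char → Option String
  | [], _ => none
  | p :: t, k => if k = p.1 then some p.2 else pvLookC t k

-- all (code-as-chars, letter) pairs stored in a trie, in DFS order
def pvToAssoc : MTrie → List (List Char × String)
  | .nil => []
  | .node v l r =>
      (match v with | some s => [(([] : List Char), s)] | none => []) ++
      (pvToAssoc l).map (fun p => ('.' :: p.1, p.2)) ++
      (pvToAssoc r).map (fun p => ('-' :: p.1, p.2))

theorem pvLookC_append (a b : List (List Char × String)) (k : List Char) :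
    pvLookC (a ++ b) k = (pvLookC a k).orElse (fun _ => pvLookC b k) := by
  induction a with
  | nil => rfl
  | cons p t ih => by_cases h : k = p.1 <;> simp [pvLookC, h, ih]

theorem pvLookC_mapCons_nil (c : Char) (l : List (List Char × String)) :
    pvLookC (l.map (fun p => (c :: p.1, p.2))) [] = none := by
  induction l with
  | nil => rfl
  | cons p t ih => simp [pvLookC, ih]

theorem pvLookC_mapCons (c d : Char) (l : List (List Char × String)) (cs : List Char) :
    pvLookC (l.map (fun p => (c :: p.1, p.2))) (d :: cs) =
      if d = c then pvLookC l cs else none := by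
  induction l with
  | nil => simp [pvLookC]
  | cons p t ih =>
      by_cases hd : d = c
      · subst hd
        by_cases h : cs = p.1 <;> simp [pvLookC, h, ih]
      · simp [pvLookC, ih, hd]

-- the trie walk is exactly first-match lookup in the pair list the trie stores
theorem pvWalk_eq_lookC (t : MTrie) (cs : List Char) :
    pvWalk t cs = pvLookC (pvToAssoc t) cs := by
  induction t generalizing cs with
  | nil => cases cs <;> rfl
  | node v l r ihl ihr =>
      cases cs with
      | nil =>
          cases v <;>
            simp [pvWalk, pvToAssoc, pvLookC, pvLookC_append, pvLookC_mapCons_nil]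
      | cons c rest =>
          by_cases hdot : c = '.'
          · subst hdot
            cases v <;>
              simp [pvWalk, pvToAssoc, pvLookC, pvLookC_append, pvLookC_mapCons, ihl]
          · by_cases hdash : c = '-'
            · subst hdash
              cases v <;>
                simp [pvWalk, pvToAssoc, pvLookC, pvLookC_append, pvLookC_mapCons, hdot, ihr]
            · cases v <;>
                simp [pvWalk, pvToAssoc, pvLookC, pvLookC_append, pvLookC_mapCons, hdot, hdash]

-- first-match lookup is order-independent when keys are distinct
theorem pvLookC_perm {l l' : List (List Char × String)}
    (h : l.Perm l') (hn : (l.map Prod.fst).Nodup) (k : List Char) :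
    pvLookC l k = pvLookC l' k := by
  induction h with
  | nil => rfl
  | cons p h ih =>
      simp only [List.map_cons, List.nodup_cons] at hn
      by_cases hk : k = p.1 <;> simp [pvLookC, hk, ih hn.2]
  | swap x y l =>
      simp only [List.map_cons, List.nodup_cons, List.mem_cons] at hn
      have hxy : y.1 ≠ x.1 := fun h => hn.1 (Or.inl h)
      by_cases h1 : k = y.1
      · subst h1; simp [pvLookC, hxy]
      · by_cases h2 : k = x.1
        · subst h2
          simp [pvLookC, h1]
        · simp [pvLookC, h1, h2]
  | trans h1 h2 ih1 ih2 =>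
      exact (ih1 hn).trans (ih2 (((h1.map Prod.fst).nodup_iff).mp hn))

-- A's comprehension is first-match lookup in the value-swapped forward list
theorem pvA_eq_lookC (w : String) :
    checkLetter w = pvLookC (pvMorseFwd.map (fun p => (p.2.toList, p.1))) w.toList := by
  unfold checkLetter
  induction pvMorseFwd with
  | nil => rfl
  | cons p t ih =>
      by_cases h : w = p.2
      · simp [pvLookC, h]
      · have h2 : (w == p.2) = false := by simp [h]
        have h3 : w.toList ≠ p.2.toList := fun hc => h (String.toList_injective hc)
        simp [pvLookC, h2, h3, ih]

-- ===== VERDICT =====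
theorem checkLetter_spec : Claim_equal_checkLetter := by
  intro word _
  unfold Spec_checkLetter checkLetter_alt
  rw [pvA_eq_lookC, pvWalk_eq_lookC]
  exact (pvLookC_perm (by decide) (by decide) word.toList).symm
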